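-- pv_equiv track=rewrite | github.com/MuriloChianfa/liblpm | bindings/python/examples/batch_lookup.py | generate_test_routes
-- ===== SOURCE A (Python) =====
-- def generate_test_routes(count: int = 1000):
--     """Generate test routes for benchmarking."""
--     routes = []
--     for i in range(min(count, 256)):
--         for j in range(min(count // 256 + 1, 256)):
--             prefix = f'{i}.{j}.0.0/16'
--             next_hop = i * 256 + j
--             routes.append((prefix, next_hop))
--             if len(routes) >= count:
--                 return routes
--     return routes
-- ===== SOURCE B (Python) =====
-- def generate_test_routes(count: int = 1000):
--     """Generate test routes for benchmarking."""
--     if count <= 0: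
--         return []
--     jmax = min(count // 256 + 1, 256)
--     total = min(count, 256 * jmax)
--     full_rows, rem = divmod(total, jmax)
--     routes = []
--     for i in range(full_rows):
--         routes.extend((f'{i}.{j}.0.0/16', i * 256 + j) for j in range(jmax))
--     routes.extend((f'{full_rows}.{j}.0.0/16', full_rows * 256 + j) for j in range(rem))
--     return routes
-- ===== Notes on version B (the rewrite author's own statement) =====
-- stated objective: alternative
-- what changed: B computes the exact output shape arithmetically up front (divmod of the total length by the row width) and emits complete rows plus one partial row, with no per-item length check and no early return.
import Mathlib
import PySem

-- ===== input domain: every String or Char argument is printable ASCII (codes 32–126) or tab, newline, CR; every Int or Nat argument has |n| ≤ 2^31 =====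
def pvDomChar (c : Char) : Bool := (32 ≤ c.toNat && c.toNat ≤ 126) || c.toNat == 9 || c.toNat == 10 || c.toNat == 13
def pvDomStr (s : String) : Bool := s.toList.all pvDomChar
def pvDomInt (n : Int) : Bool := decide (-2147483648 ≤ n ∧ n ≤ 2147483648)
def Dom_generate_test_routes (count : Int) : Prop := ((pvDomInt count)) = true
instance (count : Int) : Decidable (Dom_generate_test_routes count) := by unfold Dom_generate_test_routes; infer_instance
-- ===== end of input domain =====

-- B replaces A's nested loops with per-item length check and early return by computing the
-- output shape arithmetically (divmod of the total length by the row width) and emitting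
-- complete rows plus one partial row; objective: alternative decomposition, same cost.


-- ===== PORT A =====
-- f'{i}.{j}.0.0/16' together with the appended pair (shared formatting helper)
def pvEntry (i j : Int) : String × Int :=
  (PySem.Int.toStr i ++ "." ++ PySem.Int.toStr j ++ ".0.0/16", i * 256 + j)

-- inner 'for j in range(...)' loop; Bool = early 'return routes' taken
def pvInnerA (count i : Int) : List Int → List (String × Int) → List (String × Int) × Bool
  | [], routes => (routes, false)
  | j :: js, routes =>
    let routes' := routes ++ [pvEntry i j]
    if count ≤ (routes'.length : Int) then (routes', true)
    else pvInnerA count i js routes'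

-- outer 'for i in range(min(count, 256))' loop
def pvOuterA (count : Int) : List Int → List (String × Int) → List (String × Int)
  | [], routes => routes
  | i :: is, routes =>
    let p := pvInnerA count i (PySem.List.pyRange 0 (min (PySem.Int.floordiv count 256 + 1) 256) 1) routes
    if p.2 then p.1 else pvOuterA count is p.1

def generate_test_routes (count : Int) : List (String × Int) :=
  pvOuterA count (PySem.List.pyRange 0 (min count 256) 1) []

-- ===== PORT B =====
-- one row of width 'width': [(f'{i}.{j}.0.0/16', i*256+j) for j in range(width)]
def pvRowB (i width : Int) : List (String × Int) :=
  (PySem.List.pyRange 0 width 1).map (pvEntry i)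

def generate_test_routes_alt (count : Int) : List (String × Int) :=
  if count ≤ 0 then []
  else
    let jmax := min (PySem.Int.floordiv count 256 + 1) 256
    let total := min count (256 * jmax)
    let full_rows := PySem.Int.floordiv total jmax
    let rem := PySem.Int.mod total jmax
    ((PySem.List.pyRange 0 full_rows 1).foldl (fun routes i => routes ++ pvRowB i jmax) [])
      ++ pvRowB full_rows rem

-- ===== PRECONDITION & SPEC =====
def Spec_generate_test_routes (count : Int) (out : List (String × Int)) : Prop := out = generate_test_routes_alt count
instance (count : Int) (out : List (String × Int)) : Decidable (Spec_generate_test_routes count out) := by unfold Spec_generate_test_routes; infer_instance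

-- ===== CLAIM (what is proved, stated in full; the proofs are below) =====
def Claim_equal_generate_test_routes : Prop := ∀ (count : Int), Dom_generate_test_routes count → Spec_generate_test_routes count (generate_test_routes count)

-- ===== LEMMAS AND PROOFS =====

-- inner loop: appends until count reached; flag = early return taken
theorem pvInnerA_eq (count i : Int) :
    ∀ (js : List Int) (routes : List (String × Int)),
      (routes.length : Int) < count →
      pvInnerA count i js routes =
        (routes ++ (js.map (pvEntry i)).take (count - routes.length).toNat,
         decide (count ≤ (routes.length : Int) + js.length)) := by
  intro js
  induction js with
  | nil =>
    intro routes h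
    simp [pvInnerA]
    omega
  | cons j js ih =>
    intro routes h
    rw [pvInnerA]
    by_cases hle : count ≤ ((routes ++ [pvEntry i j]).length : Int)
    · rw [if_pos hle]
      have hlen : (routes.length : Int) + 1 = count := by
        simp at hle; omega
      have h1 : (count - (routes.length : Int)).toNat = 1 := by omega
      have h2 : decide (count ≤ (routes.length : Int) + ((j :: js).length : Nat)) = true := by
        simp; omega
      rw [h1, h2]
      simp
    · rw [if_neg hle]
      have h' : ((routes ++ [pvEntry i j]).length : Int) < count := by
        simp at hle ⊢; omega
      rw [ih _ h']
      have h2 : (count - ((routes ++ [pvEntry i j]).length : Int)).toNat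
          = (count - (routes.length : Int)).toNat - 1 := by simp; omega
      have h3 : (count - (routes.length : Int)).toNat = ((count - (routes.length : Int)).toNat - 1) + 1 := by
        simp at hle; omega
      rw [Prod.mk.injEq]
      constructor
      · rw [h2, h3]
        simp [List.take_succ_cons]
      · simp; omega

-- outer loop: concatenates rows until count reached = take of the flattened grid
theorem pvOuterA_eq (count : Int) :
    ∀ (is : List Int) (routes : List (String × Int)),
      (routes.length : Int) < count →
      pvOuterA count is routes =
        routes ++ (is.flatMap (fun i =>
          (PySem.List.pyRange 0 (min (PySem.Int.floordiv count 256 + 1) 256) 1).map (pvEntry i))).take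
            (count - routes.length).toNat := by
  intro is
  induction is with
  | nil => intro routes h; simp [pvOuterA]
  | cons i is ih =>
    intro routes h
    set J := min (PySem.Int.floordiv count 256 + 1) 256 with hJ
    set R := (PySem.List.pyRange 0 J 1).map (pvEntry i) with hR
    have hlenJ : (PySem.List.pyRange 0 J 1).length = J.toNat := by
      rw [PySem.List.length_pyRange_one]; norm_num
    have hRlen : R.length = J.toNat := by simp [hR, hlenJ]
    rw [pvOuterA, pvInnerA_eq count i _ routes h]
    simp only [← hJ, hlenJ]
    by_cases hfl : count ≤ (routes.length : Int) + (J.toNat : Int)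
    · have hd : decide (count ≤ (routes.length : Int) + ((J.toNat : Nat) : Int)) = true := by
        simpa using hfl
      simp only [hd, if_true]
      have hk : (count - (routes.length : Int)).toNat ≤ R.length := by
        rw [hRlen]; omega
      rw [List.flatMap_cons, ← hR, List.take_append]
      have h0 : (count - (routes.length : Int)).toNat - R.length = 0 := by omega
      rw [h0]
      simp
    · have hd : decide (count ≤ (routes.length : Int) + ((J.toNat : Nat) : Int)) = false := by
        simpa using hfl
      simp only [hd, Bool.false_eq_true, if_false]
      have hk : R.length ≤ (count - (routes.length : Int)).toNat := by
        rw [hRlen]; omega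
      have htk : R.take (count - (routes.length : Int)).toNat = R := List.take_of_length_le hk
      rw [htk]
      have h' : (((routes ++ R).length : Nat) : Int) < count := by
        rw [List.length_append, hRlen]; push_cast; omega
      rw [ih _ h']
      rw [List.flatMap_cons, ← hR, List.take_append, List.take_of_length_le hk]
      have hsub : (count - (((routes ++ R).length : Nat) : Int)).toNat
          = (count - ((routes.length : Nat) : Int)).toNat - R.length := by
        rw [List.length_append, hRlen]; push_cast; omega
      rw [hsub, List.append_assoc]

-- taking a prefix of a mapped range shortens the range
theorem pv_take_map_range {β : Type} (g : Int → β) (k N : Int) (hk : 0 ≤ k) (_hN : 0 ≤ N) :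
    ((PySem.List.pyRange 0 N 1).map g).take k.toNat
      = (PySem.List.pyRange 0 (min k N) 1).map g := by
  by_cases h : k ≤ N
  · have hmin : min k N = k := min_eq_left h
    rw [hmin, PySem.List.pyRange_one_append 0 k N hk h, List.map_append]
    have hlen : ((PySem.List.pyRange 0 k 1).map g).length = k.toNat := by
      simp [PySem.List.length_pyRange_one]
    rw [List.take_append, hlen]
    simp
  · have hmin : min k N = N := min_eq_right (by omega)
    rw [hmin]
    apply List.take_of_length_le
    simp [PySem.List.length_pyRange_one]
    omega

-- one row at offset n*J is a segment of the divmod-indexed range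
theorem pv_row_eq (J n rem : Int) (hJ : 0 < J) (h0 : 0 ≤ rem) (hrem : rem ≤ J) :
    (PySem.List.pyRange (n * J) (n * J + rem) 1).map
        (fun k => pvEntry (PySem.Int.floordiv k J) (PySem.Int.mod k J))
      = (PySem.List.pyRange 0 rem 1).map (pvEntry n) := by
  rw [PySem.List.pyRange_one (n * J) (n * J + rem), PySem.List.pyRange_one 0 rem]
  have harg : n * J + rem - n * J = rem := by ring
  have hz : rem - 0 = rem := by ring
  rw [harg, hz, List.map_map, List.map_map]
  apply List.map_congr_left
  intro a ha
  have haR : (a : Int) < rem := by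
    have := List.mem_range.mp ha
    omega
  have ha0 : (0 : Int) ≤ a := by positivity
  simp only [Function.comp]
  have hfd : PySem.Int.floordiv (n * J + a) J = n := by
    rw [PySem.Int.floordiv_eq_ediv_of_pos hJ]
    rw [add_comm, Int.add_mul_ediv_right _ _ (by omega)]
    rw [Int.ediv_eq_zero_of_lt ha0 (by omega)]
    ring
  have hmd : PySem.Int.mod (n * J + a) J = a := by
    rw [PySem.Int.mod_eq_emod_of_pos hJ]
    rw [add_comm, Int.add_mul_emod_self_right]
    exact Int.emod_eq_of_lt ha0 (by omega)
  rw [hfd, hmd]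
  congr 1
  omega

-- the flattened grid of rows is the single divmod-indexed range
theorem pv_grid_eq (J : Int) (hJ : 0 < J) :
    ∀ (m : Int), 0 ≤ m →
      (PySem.List.pyRange 0 m 1).flatMap (fun i => (PySem.List.pyRange 0 J 1).map (pvEntry i))
        = (PySem.List.pyRange 0 (m * J) 1).map
            (fun k => pvEntry (PySem.Int.floordiv k J) (PySem.Int.mod k J)) := by
  intro m hm
  induction m, hm using Int.le_induction with
  | base =>
    simp [PySem.List.pyRange_zero]
  | succ n hn ih =>
    rw [PySem.List.pyRange_one_succ_right (by omega), List.flatMap_append, ih]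
    have hsplit : PySem.List.pyRange 0 ((n + 1) * J) 1
        = PySem.List.pyRange 0 (n * J) 1 ++ PySem.List.pyRange (n * J) ((n + 1) * J) 1 := by
      apply PySem.List.pyRange_one_append
      · positivity
      · nlinarith
    rw [hsplit, List.map_append]
    congr 1
    simp only [List.flatMap_cons, List.flatMap_nil, List.append_nil]
    have harg : (n + 1) * J = n * J + J := by ring
    rw [harg, pv_row_eq J n J hJ (by omega) le_rfl]

-- ===== VERDICT (by name: the statement is the Claim_ definition above) =====
theorem generate_test_routes_spec : Claim_equal_generate_test_routes := by
  intro count _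
  unfold Spec_generate_test_routes generate_test_routes generate_test_routes_alt
  by_cases hc : count ≤ 0
  · have h1 : PySem.List.pyRange 0 (min count 256) 1 = [] :=
      PySem.List.pyRange_one_eq_nil (by omega)
    simp [h1, pvOuterA, hc]
  · rw [if_neg hc]
    have hcount : 1 ≤ count := by omega
    set J := min (PySem.Int.floordiv count 256 + 1) 256 with hJdef
    have hJpos : 0 < J := by
      have : 0 ≤ PySem.Int.floordiv count 256 := by
        rw [PySem.Int.floordiv_eq_ediv_of_pos (by norm_num)]
        exact Int.ediv_nonneg (by omega) (by norm_num)
      omega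
    have hJle : J ≤ 256 := min_le_right _ _
    set total := min count (256 * J) with htotdef
    have htot1 : 1 ≤ total := by
      have : (256 : Int) ≤ 256 * J := by nlinarith
      omega
    set F := PySem.Int.floordiv total J with hFdef
    set R := PySem.Int.mod total J with hRdef
    have hFed : F = total / J := by rw [hFdef, PySem.Int.floordiv_eq_ediv_of_pos hJpos]
    have hRed : R = total % J := by rw [hRdef, PySem.Int.mod_eq_emod_of_pos hJpos]
    have hF0 : 0 ≤ F := by rw [hFed]; exact Int.ediv_nonneg (by omega) (by omega)
    have hR0 : 0 ≤ R := by rw [hRed]; exact Int.emod_nonneg _ (by omega)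
    have hRJ : R < J := by rw [hRed]; exact Int.emod_lt_of_pos _ hJpos
    have hdm : F * J + R = total := by
      rw [hFed, hRed, mul_comm]
      exact Int.mul_ediv_add_emod total J
    -- A-side: unfold the loops to a take of the flattened grid, then a divmod-indexed range
    rw [pvOuterA_eq count _ [] (by simpa using hcount)]
    rw [pv_grid_eq J hJpos (min count 256) (by omega)]
    simp only [List.nil_append, List.length_nil, Nat.cast_zero, sub_zero]
    rw [pv_take_map_range _ count (min count 256 * J) (by omega) (by positivity)]
    -- B-side: rows then partial row = divmod-indexed range
    rw [PySem.List.foldl_append_eq_flatMap]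
    simp only [pvRowB]
    rw [pv_grid_eq J hJpos F hF0]
    rw [← pv_row_eq J F R hJpos hR0 (by omega)]
    rw [List.nil_append, ← List.map_append, ← PySem.List.pyRange_one_append 0 (F * J) (F * J + R)
      (by positivity) (by omega)]
    rw [hdm]
    -- remaining: the two range bounds agree
    congr 2
    rcases le_or_gt count 256 with h | h
    · have h1 : min count 256 = count := min_eq_left h
      rw [h1]
      have hA : count ≤ count * J := le_mul_of_one_le_right (by omega) hJpos
      have hB : count ≤ 256 * J := by nlinarith
      rw [min_eq_left hA, htotdef, min_eq_left hB]
    · have h1 : min count 256 = 256 := min_eq_right (by omega)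
      rw [h1, htotdef]
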